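-- pv_equiv track=rewrite | github.com/ZhangCheng-zh/blog | blog_all_python_combined.py | minCostBuyAllWords
-- ===== SOURCE A (Python) =====
-- class TrieNode:
--     def __init__(self):
--         self.children = {}
--         self.wordCost = None
--         self.bundleCost = None
--
-- def minCostBuyAllWords(words, wordCost, bundleCost):
--     root = TrieNode()
--
--     # Insert all words
--     for w in words:
--         node = root
--         for ch in w:
--             if ch not in node.children:
--                 node.children[ch] = TrieNode()
--             node = node.children[ch]
--         # reach the end letter of word, add wordCost
--         node.wordCost = wordCost[w]
--
--     # Insert all bundle prefixes (even if no word currently matches)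
--     for prefix, cost in bundleCost.items():
--         node = root
--         for ch in prefix:
--             if ch not in node.children:
--                 node.children[ch] = TrieNode()
--             node = node.children[ch]
--         node.bundleCost = cost if node.bundleCost is None else min(node.bundleCost, cost)
--
--     def dfs(node):
--         # if node is complete word node, update baseCost
--         baseCost = (node.wordCost or 0)
--         # sum all children's cost
--         for child in node.children.values():
--             baseCost += dfs(child)
--
--         if node.bundleCost is None:
--             return baseCost
--         # compare prefix cost and all individual child cost
--         return min(baseCost, node.bundleCost)
--
--     return dfs(root)
-- ===== SOURCE B (Python) =====
-- def minCostBuyAllWords(words, wordCost, bundleCost):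
--     # Flat prefix-set formulation: no trie objects; costs live in two plain
--     # dicts and the recursion walks prefix strings directly.
--     wc = {}
--     for w in words:
--         wc[w] = wordCost[w]
--     bc = {}
--     for p, c in bundleCost.items():
--         bc[p] = min(bc[p], c) if p in bc else c
--     prefixes = set()
--     for s in list(wc) + list(bc):
--         for i in range(1, len(s) + 1):
--             prefixes.add(s[:i])
--
--     def solve(p):
--         total = wc.get(p, 0)
--         for q in prefixes:
--             if len(q) == len(p) + 1 and q[:len(p)] == p:
--                 total += solve(q)
--         return min(total, bc[p]) if p in bc else total
--
--     return solve("")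
-- ===== Notes on version B (the rewrite author's own statement) =====
-- stated objective: alternative
-- what changed: Replaces A's linked trie (TrieNode objects with per-node child dicts built by two insertion loops, then a recursive DFS over nodes) by a flat formulation: two plain dicts for word/bundle costs plus one set of all key prefixes, with the recursion walking prefix strings directly and finding children by scanning the prefix set.
import Mathlib
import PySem

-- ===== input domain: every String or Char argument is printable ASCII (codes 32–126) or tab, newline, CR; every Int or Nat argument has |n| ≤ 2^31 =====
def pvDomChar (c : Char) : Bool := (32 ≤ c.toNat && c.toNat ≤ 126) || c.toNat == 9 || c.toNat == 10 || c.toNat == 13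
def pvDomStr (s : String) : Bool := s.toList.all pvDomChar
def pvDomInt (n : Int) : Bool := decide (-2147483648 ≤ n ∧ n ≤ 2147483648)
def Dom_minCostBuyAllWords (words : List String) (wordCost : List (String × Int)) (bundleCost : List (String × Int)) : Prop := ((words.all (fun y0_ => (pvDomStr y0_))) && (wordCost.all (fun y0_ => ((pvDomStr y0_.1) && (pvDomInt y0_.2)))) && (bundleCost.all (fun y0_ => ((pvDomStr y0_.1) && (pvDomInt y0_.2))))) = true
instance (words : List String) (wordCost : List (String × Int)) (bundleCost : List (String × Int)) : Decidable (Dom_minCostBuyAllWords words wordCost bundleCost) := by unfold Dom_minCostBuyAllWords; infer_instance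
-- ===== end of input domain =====

-- B replaces A's linked trie (node objects with child dicts, recursive DFS on nodes) by a flat
-- prefix-set formulation: two cost dicts plus one set of all prefixes, with the recursion walking
-- prefix strings directly (objective: alternative; same exact return value).

-- ===== PORT A =====
-- A's TrieNode: wordCost field, bundleCost field, children (insertion-ordered dict Char → node,
-- modelled as the mutual assoc structure PyKids — a mutual pair, no nested inductive).
mutual
inductive PyTrie : Type where
  | mk : Option Int → Option Int → PyKids → PyTrie
inductive PyKids : Type where
  | nil : PyKids
  | cons : Char → PyTrie → PyKids → PyKids
end

-- children dict lookup (first match; keys are unique by construction)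
def PyKids.find? : PyKids → Char → Option PyTrie
  | .nil, _ => none
  | .cons c t r, d => if c = d then some t else PyKids.find? r d

-- children dict write: overwrite in place, new key appends (Python dict insertion order)
def PyKids.set : PyKids → Char → PyTrie → PyKids
  | .nil, d, u => .cons d u .nil
  | .cons c t r, d, u => if c = d then .cons c u r else .cons c t (PyKids.set r d u)

-- the word-insertion loop body of A (walk/create the chain for w, set wordCost at the end)
def PyTrie.insertW : PyTrie → List Char → Int → PyTrie
  | .mk _ b k, [], v => .mk (some v) b k
  | .mk w b k, c :: cs, v =>
      PyTrie.mk w b (k.set c (PyTrie.insertW ((k.find? c).getD (.mk none none .nil)) cs v))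

-- the bundle-insertion loop body of A (walk/create the chain, min-update bundleCost at the end)
def PyTrie.insertB : PyTrie → List Char → Int → PyTrie
  | .mk w b k, [], v => .mk w (some (match b with | none => v | some m => min m v)) k
  | .mk w b k, c :: cs, v =>
      PyTrie.mk w b (k.set c (PyTrie.insertB ((k.find? c).getD (.mk none none .nil)) cs v))

-- A's dfs: baseCost = (wordCost or 0) + sum of children, then min with bundleCost if present
mutual
def PyTrie.dfs : PyTrie → Int
  | .mk w b k =>
      match b with
      | none => w.getD 0 + PyKids.dfsSum k
      | some m => min (w.getD 0 + PyKids.dfsSum k) m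
def PyKids.dfsSum : PyKids → Int
  | .nil => 0
  | .cons _ t r => PyTrie.dfs t + PyKids.dfsSum r
end

def minCostBuyAllWords (words : List String) (wordCost : List (String × Int)) (bundleCost : List (String × Int)) : Int :=
  -- wordCost[w] is a dict lookup; Pre_ excludes the KeyError case, so the default 0 is never used
  let root1 := words.foldl (fun t w => t.insertW w.toList ((PySem.Dict.mk wordCost).getD w 0))
      (PyTrie.mk none none .nil)
  let root2 := bundleCost.foldl (fun t pc => t.insertB pc.1.toList pc.2) root1
  root2.dfs

-- ===== PORT B =====
-- wc = {w: wordCost[w] for w in words}  (keys as char lists: exact, String ↔ List Char)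
def altWc (words : List String) (wordCost : List (String × Int)) : PySem.Dict (List Char) Int :=
  words.foldl (fun d w => d.insert w.toList ((PySem.Dict.mk wordCost).getD w 0)) PySem.Dict.empty

-- bc[p] = min(bc[p], c) if p in bc else c
def altBc (bundleCost : List (String × Int)) : PySem.Dict (List Char) Int :=
  bundleCost.foldl (fun d pc =>
      d.insert pc.1.toList (match d.get? pc.1.toList with | some m => min m pc.2 | none => pc.2))
    PySem.Dict.empty

-- prefixes.add(s[:i]) for i in range(1, len(s)+1), over all keys
def altPrefixes (ks : List (List Char)) : PySem.Set (List Char) :=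
  ks.foldl (fun s k =>
      (PySem.List.pyRange 1 ((k.length : Int) + 1) 1).foldl
        (fun s i => PySem.Set.add s (k.take i.toNat)) s)
    PySem.Set.empty

-- solve(p); the fuel argument exists only to make the recursion total in Lean — every call made
-- by minCostBuyAllWords_alt has fuel exceeding the recursion depth (the sum over the set is
-- order-independent, so folding the Set's list is exact)
def altSolve (pref : List (List Char)) (wc bc : PySem.Dict (List Char) Int) : Nat → List Char → Int
  | 0, _ => 0
  | fuel+1, p =>
      let total := pref.foldl
        (fun acc q =>
          if q.length = p.length + 1 ∧ q.take p.length = p then acc + altSolve pref wc bc fuel q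
          else acc)
        (wc.getD p 0)
      match bc.get? p with | some m => min total m | none => total

def minCostBuyAllWords_alt (words : List String) (wordCost : List (String × Int)) (bundleCost : List (String × Int)) : Int :=
  let wc := altWc words wordCost
  let bc := altBc bundleCost
  let pref := altPrefixes (wc.keys ++ bc.keys)
  altSolve pref wc bc (1 + pref.foldl (fun m q => max m q.length) 0) []

-- ===== PRECONDITION & SPEC =====
-- Pre_ excludes exactly the inputs where A raises KeyError: some word of `words` is not a key of
-- the wordCost dict.
def Pre_minCostBuyAllWords (words : List String) (wordCost : List (String × Int)) (bundleCost : List (String × Int)) : Prop :=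
  ∀ w ∈ words, w ∈ wordCost.map Prod.fst
instance (words : List String) (wordCost : List (String × Int)) (bundleCost : List (String × Int)) : Decidable (Pre_minCostBuyAllWords words wordCost bundleCost) := by unfold Pre_minCostBuyAllWords; infer_instance

def pvWitness_minCostBuyAllWords : List String × (List (String × Int)) × (List (String × Int)) :=
  (["ab", "a"], [("ab", 5), ("a", 2)], [("a", 3)])

def Spec_minCostBuyAllWords (words : List String) (wordCost : List (String × Int)) (bundleCost : List (String × Int)) (out : Int) : Prop := out = minCostBuyAllWords_alt words wordCost bundleCost
instance (words : List String) (wordCost : List (String × Int)) (bundleCost : List (String × Int)) (out : Int) : Decidable (Spec_minCostBuyAllWords words wordCost bundleCost out) := by unfold Spec_minCostBuyAllWords; infer_instance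

-- ===== CLAIM (what is proved, stated in full; the proofs are below) =====
def Claim_equal_minCostBuyAllWords : Prop := ∀ (words : List String) (wordCost : List (String × Int)) (bundleCost : List (String × Int)), Dom_minCostBuyAllWords words wordCost bundleCost → Pre_minCostBuyAllWords words wordCost bundleCost → Spec_minCostBuyAllWords words wordCost bundleCost (minCostBuyAllWords words wordCost bundleCost)

-- ===== LEMMAS AND PROOFS =====

def PyTrie.nodeAt : PyTrie → List Char → Option PyTrie
  | t, [] => some t
  | .mk _ _ k, c :: cs =>
      match k.find? c with
      | none => none
      | some t' => PyTrie.nodeAt t' cs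

def PyTrie.wordAt (t : PyTrie) (l : List Char) : Option Int :=
  match t.nodeAt l with | some (.mk w _ _) => w | none => none
def PyTrie.bundleAt (t : PyTrie) (l : List Char) : Option Int :=
  match t.nodeAt l with | some (.mk _ b _) => b | none => none
def PyTrie.kidsAt (t : PyTrie) (l : List Char) : Option PyKids :=
  match t.nodeAt l with | some (.mk _ _ k) => some k | none => none
def PyTrie.hasNode (t : PyTrie) (l : List Char) : Prop := (t.nodeAt l).isSome

def PyKids.keys : PyKids → List Char
  | .nil => []
  | .cons c _ r => c :: PyKids.keys r

def PyTrie.wfAt (t : PyTrie) (l : List Char) : Prop := ∀ k, t.kidsAt l = some k → k.keys.Nodup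

-- dict lookup A performs for wordCost[w], as a function of the char list
def wLookup (wordCost : List (String × Int)) (l : List Char) : Int :=
  (PySem.Dict.mk wordCost).getD (String.ofList l) 0

-- running min-option over the bundle items with the given key (shared shape of both folds)
def bopt (items : List (String × Int)) (l : List Char) (o : Option Int) : Option Int :=
  items.foldl
    (fun o pc => if pc.1.toList = l then some (match o with | none => pc.2 | some m => min m pc.2) else o) o

-- ---- basic Kids / nodeAt lemmas ----
theorem pyKids_find?_set_self : ∀ (k : PyKids) (c : Char) (u : PyTrie), (k.set c u).find? c = some u
  | .nil, c, u => by simp [PyKids.set, PyKids.find?]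
  | .cons c' t r, c, u => by
      by_cases h : c' = c
      · subst h; simp [PyKids.set, PyKids.find?]
      · simp [PyKids.set, PyKids.find?, h, pyKids_find?_set_self r c u]

theorem pyKids_find?_set_ne : ∀ (k : PyKids) (c d : Char) (u : PyTrie), d ≠ c →
    (k.set c u).find? d = k.find? d
  | .nil, c, d, u, h => by simp [PyKids.set, PyKids.find?, Ne.symm h]
  | .cons c' t r, c, d, u, h => by
      by_cases h' : c' = c
      · subst h'; simp [PyKids.set, PyKids.find?, Ne.symm h]
      · simp only [PyKids.set, if_neg h', PyKids.find?]
        by_cases h2 : c' = d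
        · simp [h2]
        · simp [h2, pyKids_find?_set_ne r c d u h]

theorem pyKids_keys_set : ∀ (k : PyKids) (c : Char) (u : PyTrie),
    (k.set c u).keys = if c ∈ k.keys then k.keys else k.keys ++ [c]
  | .nil, c, u => by simp [PyKids.set, PyKids.keys]
  | .cons c' t r, c, u => by
      by_cases h : c' = c
      · subst h; simp [PyKids.set, PyKids.keys]
      · simp only [PyKids.set, if_neg h, PyKids.keys, pyKids_keys_set r c u, List.mem_cons]
        have h2 : ¬ c = c' := fun e => h e.symm
        by_cases h3 : c ∈ r.keys <;> simp [h3, h2]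

theorem pyKids_find?_isSome_iff : ∀ (k : PyKids) (c : Char), (k.find? c).isSome ↔ c ∈ k.keys
  | .nil, c => by simp [PyKids.find?, PyKids.keys]
  | .cons c' t r, c => by
      by_cases h : c' = c
      · subst h; simp [PyKids.find?, PyKids.keys]
      · have h2 : ¬ c = c' := fun e => h e.symm
        simp [PyKids.find?, PyKids.keys, h, h2, pyKids_find?_isSome_iff r c]

theorem pyTrie_nodeAt_nil (t : PyTrie) : t.nodeAt [] = some t := by
  cases t; rfl

theorem pyTrie_wordAt_nil (w b : Option Int) (k : PyKids) : (PyTrie.mk w b k).wordAt [] = w := by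
  simp [PyTrie.wordAt, pyTrie_nodeAt_nil]

theorem pyTrie_bundleAt_nil (w b : Option Int) (k : PyKids) : (PyTrie.mk w b k).bundleAt [] = b := by
  simp [PyTrie.bundleAt, pyTrie_nodeAt_nil]

theorem pyTrie_kidsAt_nil (w b : Option Int) (k : PyKids) : (PyTrie.mk w b k).kidsAt [] = some k := by
  simp [PyTrie.kidsAt, pyTrie_nodeAt_nil]

theorem pyTrie_nodeAt_cons (w b : Option Int) (k : PyKids) (d : Char) (l : List Char) :
    (PyTrie.mk w b k).nodeAt (d :: l) =
      match k.find? d with | some ch => ch.nodeAt l | none => none := by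
  cases hf : k.find? d <;> simp [PyTrie.nodeAt, hf]

theorem pyTrie_wordAt_cons (w b : Option Int) (k : PyKids) (d : Char) (l : List Char) :
    (PyTrie.mk w b k).wordAt (d :: l) =
      match k.find? d with | some ch => ch.wordAt l | none => none := by
  cases hf : k.find? d <;> simp [PyTrie.wordAt, pyTrie_nodeAt_cons, hf]

theorem pyTrie_bundleAt_cons (w b : Option Int) (k : PyKids) (d : Char) (l : List Char) :
    (PyTrie.mk w b k).bundleAt (d :: l) =
      match k.find? d with | some ch => ch.bundleAt l | none => none := by
  cases hf : k.find? d <;> simp [PyTrie.bundleAt, pyTrie_nodeAt_cons, hf]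

theorem pyTrie_kidsAt_cons (w b : Option Int) (k : PyKids) (d : Char) (l : List Char) :
    (PyTrie.mk w b k).kidsAt (d :: l) =
      match k.find? d with | some ch => ch.kidsAt l | none => none := by
  cases hf : k.find? d <;> simp [PyTrie.kidsAt, pyTrie_nodeAt_cons, hf]

theorem pyTrie_hasNode_nil (t : PyTrie) : t.hasNode [] := by
  simp [PyTrie.hasNode, pyTrie_nodeAt_nil]

theorem pyTrie_hasNode_cons (w b : Option Int) (k : PyKids) (d : Char) (l : List Char) :
    (PyTrie.mk w b k).hasNode (d :: l) ↔ ∃ ch, k.find? d = some ch ∧ ch.hasNode l := by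
  cases hf : k.find? d <;> simp [PyTrie.hasNode, pyTrie_nodeAt_cons, hf]

theorem pyTrie_kidsAt_mk (w w' b b' : Option Int) (k : PyKids) (l : List Char) :
    (PyTrie.mk w b k).kidsAt l = (PyTrie.mk w' b' k).kidsAt l := by
  cases l with
  | nil => simp [pyTrie_kidsAt_nil]
  | cons d l' => simp [pyTrie_kidsAt_cons]

theorem pyTrie_nodeAt_append_singleton : ∀ (l : List Char) (t : PyTrie) (c : Char),
    t.nodeAt (l ++ [c]) = match t.kidsAt l with | some k => k.find? c | none => none
  | [], t, c => by
      obtain ⟨w, b, k⟩ := t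
      cases hf : k.find? c <;>
        simp [pyTrie_nodeAt_cons, pyTrie_kidsAt_nil, hf, pyTrie_nodeAt_nil]
  | d :: l', t, c => by
      obtain ⟨w, b, k⟩ := t
      rw [List.cons_append, pyTrie_nodeAt_cons, pyTrie_kidsAt_cons]
      cases hf : k.find? d with
      | none => rfl
      | some ch => exact pyTrie_nodeAt_append_singleton l' ch c

theorem pvEmptyT_wordAt (l : List Char) : (PyTrie.mk none none PyKids.nil).wordAt l = none := by
  cases l with
  | nil => simp [pyTrie_wordAt_nil]
  | cons d l' => simp [pyTrie_wordAt_cons, PyKids.find?]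

theorem pvEmptyT_bundleAt (l : List Char) : (PyTrie.mk none none PyKids.nil).bundleAt l = none := by
  cases l with
  | nil => simp [pyTrie_bundleAt_nil]
  | cons d l' => simp [pyTrie_bundleAt_cons, PyKids.find?]

theorem pvEmptyT_hasNode (l : List Char) : (PyTrie.mk none none PyKids.nil).hasNode l ↔ l = [] := by
  cases l with
  | nil => simp [pyTrie_hasNode_nil]
  | cons d l' => simp [pyTrie_hasNode_cons, PyKids.find?]

theorem pvEmptyT_wfAt (l : List Char) : (PyTrie.mk none none PyKids.nil).wfAt l := by
  intro k hk
  cases l with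
  | nil => rw [pyTrie_kidsAt_nil] at hk; cases hk; simp [PyKids.keys]
  | cons d l' => rw [pyTrie_kidsAt_cons] at hk; simp [PyKids.find?] at hk

-- field accessors through a `.getD`-style child step (both find? outcomes)
theorem pyTrie_wordAt_consE (w b : Option Int) (k : PyKids) (d : Char) (l : List Char) :
    (PyTrie.mk w b k).wordAt (d :: l) =
      ((k.find? d).getD (PyTrie.mk none none PyKids.nil)).wordAt l := by
  cases hf : k.find? d with
  | none => simp [pyTrie_wordAt_cons, hf, pvEmptyT_wordAt]
  | some ch => simp [pyTrie_wordAt_cons, hf]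

theorem pyTrie_bundleAt_consE (w b : Option Int) (k : PyKids) (d : Char) (l : List Char) :
    (PyTrie.mk w b k).bundleAt (d :: l) =
      ((k.find? d).getD (PyTrie.mk none none PyKids.nil)).bundleAt l := by
  cases hf : k.find? d with
  | none => simp [pyTrie_bundleAt_cons, hf, pvEmptyT_bundleAt]
  | some ch => simp [pyTrie_bundleAt_cons, hf]

theorem pyTrie_wordAt_cons_some {w b : Option Int} {k : PyKids} {d : Char} {ch : PyTrie}
    (l : List Char) (hf : k.find? d = some ch) :
    (PyTrie.mk w b k).wordAt (d :: l) = ch.wordAt l := by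
  simp [pyTrie_wordAt_cons, hf]

theorem pyTrie_bundleAt_cons_some {w b : Option Int} {k : PyKids} {d : Char} {ch : PyTrie}
    (l : List Char) (hf : k.find? d = some ch) :
    (PyTrie.mk w b k).bundleAt (d :: l) = ch.bundleAt l := by
  simp [pyTrie_bundleAt_cons, hf]

theorem pyKids_dfsSum_eq : ∀ (k : PyKids), k.keys.Nodup →
    k.dfsSum = (k.keys.map (fun c => ((k.find? c).getD (PyTrie.mk none none PyKids.nil)).dfs)).sum
  | .nil, _ => by simp [PyKids.dfsSum, PyKids.keys]
  | .cons c t r, h => by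
      obtain ⟨hc, hr⟩ := List.nodup_cons.mp h
      have hfc : PyKids.find? (.cons c t r) c = some t := by simp [PyKids.find?]
      simp only [PyKids.dfsSum, PyKids.keys, List.map_cons, List.sum_cons, hfc, Option.getD_some]
      congr 1
      rw [pyKids_dfsSum_eq r hr]
      apply congrArg
      apply List.map_congr_left
      intro c' hc'
      have hne : ¬ c = c' := fun e => hc (e ▸ hc')
      simp [PyKids.find?, hne]

-- ---- per-insert characterizations ----
theorem insertW_unfold_cons (w b : Option Int) (k : PyKids) (c : Char) (cs : List Char) (v : Int) :
    PyTrie.insertW (PyTrie.mk w b k) (c :: cs) v =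
      PyTrie.mk w b (k.set c
        (PyTrie.insertW ((k.find? c).getD (PyTrie.mk none none PyKids.nil)) cs v)) := rfl

theorem insertB_unfold_nil (w b : Option Int) (k : PyKids) (v : Int) :
    PyTrie.insertB (PyTrie.mk w b k) [] v =
      PyTrie.mk w (some (match b with | none => v | some m => min m v)) k := rfl

theorem insertB_unfold_cons (w b : Option Int) (k : PyKids) (c : Char) (cs : List Char) (v : Int) :
    PyTrie.insertB (PyTrie.mk w b k) (c :: cs) v =
      PyTrie.mk w b (k.set c
        (PyTrie.insertB ((k.find? c).getD (PyTrie.mk none none PyKids.nil)) cs v)) := rfl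

theorem insertW_wordAt : ∀ (cs : List Char) (v : Int) (t : PyTrie) (l : List Char),
    (t.insertW cs v).wordAt l = if l = cs then some v else t.wordAt l
  | [], v, t, l => by
      obtain ⟨w, b, k⟩ := t
      cases l with
      | nil => simp [PyTrie.insertW, pyTrie_wordAt_nil]
      | cons d l' => simp [PyTrie.insertW, pyTrie_wordAt_cons]
  | c :: cs', v, t, l => by
      obtain ⟨w, b, k⟩ := t
      cases l with
      | nil => simp [insertW_unfold_cons, pyTrie_wordAt_nil]
      | cons d l' =>
        rw [insertW_unfold_cons]
        by_cases hd : d = c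
        · subst hd
          rw [pyTrie_wordAt_cons_some l' (pyKids_find?_set_self k d _),
            insertW_wordAt cs' v _ l', pyTrie_wordAt_consE]
          by_cases hl : l' = cs' <;> simp [hl]
        · have hne : ¬ (d :: l' = c :: cs') := by simp [hd]
          rw [pyTrie_wordAt_cons, pyKids_find?_set_ne _ _ _ _ hd,
            ← pyTrie_wordAt_cons w b k d l', if_neg hne]

theorem insertW_bundleAt : ∀ (cs : List Char) (v : Int) (t : PyTrie) (l : List Char),
    (t.insertW cs v).bundleAt l = t.bundleAt l
  | [], v, t, l => by
      obtain ⟨w, b, k⟩ := t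
      cases l with
      | nil => simp [PyTrie.insertW, pyTrie_bundleAt_nil]
      | cons d l' => simp [PyTrie.insertW, pyTrie_bundleAt_cons]
  | c :: cs', v, t, l => by
      obtain ⟨w, b, k⟩ := t
      cases l with
      | nil => simp [insertW_unfold_cons, pyTrie_bundleAt_nil]
      | cons d l' =>
        rw [insertW_unfold_cons]
        by_cases hd : d = c
        · subst hd
          rw [pyTrie_bundleAt_cons_some l' (pyKids_find?_set_self k d _),
            insertW_bundleAt cs' v _ l', pyTrie_bundleAt_consE]
        · rw [pyTrie_bundleAt_cons, pyKids_find?_set_ne _ _ _ _ hd,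
            ← pyTrie_bundleAt_cons w b k d l']

theorem insertW_hasNode : ∀ (cs : List Char) (v : Int) (t : PyTrie) (l : List Char),
    (t.insertW cs v).hasNode l ↔ t.hasNode l ∨ l <+: cs
  | [], v, t, l => by
      obtain ⟨w, b, k⟩ := t
      cases l with
      | nil => simp [pyTrie_hasNode_nil]
      | cons d l' =>
        simp only [PyTrie.insertW, pyTrie_hasNode_cons]
        have : ¬ ((d :: l') <+: ([] : List Char)) := by
          intro h; exact absurd (List.prefix_nil.mp h) (by simp)
        simp [this]
  | c :: cs', v, t, l => by
      obtain ⟨w, b, k⟩ := t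
      cases l with
      | nil => simp [pyTrie_hasNode_nil]
      | cons d l' =>
        rw [insertW_unfold_cons]
        by_cases hd : d = c
        · subst hd
          rw [pyTrie_hasNode_cons]
          constructor
          · rintro ⟨ch, hch, hh⟩
            rw [pyKids_find?_set_self] at hch
            cases hch
            rw [insertW_hasNode cs' v _ l'] at hh
            rcases hh with hh | hh
            · cases hf : k.find? d with
              | none =>
                rw [hf] at hh
                simp only [Option.getD] at hh
                rw [pvEmptyT_hasNode] at hh
                right; rw [hh]
                exact List.cons_prefix_cons.mpr ⟨rfl, List.nil_prefix⟩
              | some ch' =>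
                rw [hf] at hh
                left; rw [pyTrie_hasNode_cons]; exact ⟨ch', hf, hh⟩
            · right; exact List.cons_prefix_cons.mpr ⟨rfl, hh⟩
          · intro hh
            refine ⟨_, pyKids_find?_set_self k d _, ?_⟩
            rw [insertW_hasNode cs' v _ l']
            rcases hh with hh | hh
            · rw [pyTrie_hasNode_cons] at hh
              obtain ⟨ch, hch, hh⟩ := hh
              left; rw [hch]; exact hh
            · right; exact (List.cons_prefix_cons.mp hh).2
        · rw [pyTrie_hasNode_cons, pyTrie_hasNode_cons]
          have hpre : ¬ ((d :: l') <+: (c :: cs')) := by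
            intro h; exact hd (List.cons_prefix_cons.mp h).1
          rw [pyKids_find?_set_ne _ _ _ _ hd]
          simp [hpre]

theorem insertW_wfAt : ∀ (cs : List Char) (v : Int) (t : PyTrie), (∀ m, t.wfAt m) →
    ∀ l, (t.insertW cs v).wfAt l
  | [], v, t, hwf, l => by
      obtain ⟨w, b, k⟩ := t
      intro k' hk'
      rw [PyTrie.insertW, pyTrie_kidsAt_mk (some v) w b b] at hk'
      exact hwf l k' hk'
  | c :: cs', v, t, hwf, l => by
      obtain ⟨w, b, k⟩ := t
      intro k' hk'
      cases l with
      | nil =>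
        rw [insertW_unfold_cons, pyTrie_kidsAt_nil] at hk'
        cases hk'
        rw [pyKids_keys_set]
        have hnd : k.keys.Nodup := hwf [] k (pyTrie_kidsAt_nil w b k)
        by_cases hm : c ∈ k.keys
        · simp [hm, hnd]
        · simp only [hm, if_false]
          rw [List.nodup_append]
          refine ⟨hnd, List.nodup_singleton c, ?_⟩
          intro a ha hb hbc
          rw [List.mem_singleton] at hbc
          subst hbc
          intro he
          subst he
          exact hm ha
      | cons d l' =>
        rw [insertW_unfold_cons, pyTrie_kidsAt_cons] at hk'
        by_cases hd : d = c
        · subst hd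
          rw [pyKids_find?_set_self] at hk'
          have hchwf : ∀ m, ((k.find? d).getD (PyTrie.mk none none PyKids.nil)).wfAt m := by
            intro m
            cases hf : k.find? d with
            | none => simp only [hf, Option.getD]; exact pvEmptyT_wfAt m
            | some ch =>
              simp only [hf, Option.getD]
              intro k2 hk2
              apply hwf (d :: m) k2
              rw [pyTrie_kidsAt_cons, hf]
              exact hk2
          exact insertW_wfAt cs' v _ hchwf l' k' hk'
        · rw [pyKids_find?_set_ne _ _ _ _ hd] at hk'
          apply hwf (d :: l') k'
          rw [pyTrie_kidsAt_cons]
          exact hk'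

theorem insertB_wordAt : ∀ (cs : List Char) (v : Int) (t : PyTrie) (l : List Char),
    (t.insertB cs v).wordAt l = t.wordAt l
  | [], v, t, l => by
      obtain ⟨w, b, k⟩ := t
      cases l with
      | nil => simp [insertB_unfold_nil, pyTrie_wordAt_nil]
      | cons d l' => simp [insertB_unfold_nil, pyTrie_wordAt_cons]
  | c :: cs', v, t, l => by
      obtain ⟨w, b, k⟩ := t
      cases l with
      | nil => simp [insertB_unfold_cons, pyTrie_wordAt_nil]
      | cons d l' =>
        rw [insertB_unfold_cons]
        by_cases hd : d = c
        · subst hd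
          rw [pyTrie_wordAt_cons_some l' (pyKids_find?_set_self k d _),
            insertB_wordAt cs' v _ l', pyTrie_wordAt_consE]
        · rw [pyTrie_wordAt_cons, pyKids_find?_set_ne _ _ _ _ hd,
            ← pyTrie_wordAt_cons w b k d l']

theorem insertB_bundleAt : ∀ (cs : List Char) (v : Int) (t : PyTrie) (l : List Char),
    (t.insertB cs v).bundleAt l =
      if l = cs then some (match t.bundleAt cs with | none => v | some m => min m v)
      else t.bundleAt l
  | [], v, t, l => by
      obtain ⟨w, b, k⟩ := t
      cases l with
      | nil => simp [insertB_unfold_nil, pyTrie_bundleAt_nil]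
      | cons d l' => simp [insertB_unfold_nil, pyTrie_bundleAt_cons]
  | c :: cs', v, t, l => by
      obtain ⟨w, b, k⟩ := t
      cases l with
      | nil => simp [insertB_unfold_cons, pyTrie_bundleAt_nil]
      | cons d l' =>
        rw [insertB_unfold_cons]
        by_cases hd : d = c
        · subst hd
          rw [pyTrie_bundleAt_cons_some l' (pyKids_find?_set_self k d _),
            insertB_bundleAt cs' v _ l', pyTrie_bundleAt_consE w b k d cs']
          by_cases hl : l' = cs'
          · simp [hl]
          · have hne : ¬ (d :: l' = d :: cs') := by simp [hl]
            rw [if_neg hl, if_neg hne, pyTrie_bundleAt_consE w b k d l']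
        · have hne : ¬ (d :: l' = c :: cs') := by simp [hd]
          rw [pyTrie_bundleAt_cons, pyKids_find?_set_ne _ _ _ _ hd,
            ← pyTrie_bundleAt_cons w b k d l', if_neg hne]

theorem insertB_hasNode : ∀ (cs : List Char) (v : Int) (t : PyTrie) (l : List Char),
    (t.insertB cs v).hasNode l ↔ t.hasNode l ∨ l <+: cs
  | [], v, t, l => by
      obtain ⟨w, b, k⟩ := t
      cases l with
      | nil => simp [pyTrie_hasNode_nil]
      | cons d l' =>
        rw [insertB_unfold_nil]
        simp only [pyTrie_hasNode_cons]
        have : ¬ ((d :: l') <+: ([] : List Char)) := by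
          intro h; exact absurd (List.prefix_nil.mp h) (by simp)
        simp [this]
  | c :: cs', v, t, l => by
      obtain ⟨w, b, k⟩ := t
      cases l with
      | nil => simp [pyTrie_hasNode_nil]
      | cons d l' =>
        rw [insertB_unfold_cons]
        by_cases hd : d = c
        · subst hd
          rw [pyTrie_hasNode_cons]
          constructor
          · rintro ⟨ch, hch, hh⟩
            rw [pyKids_find?_set_self] at hch
            cases hch
            rw [insertB_hasNode cs' v _ l'] at hh
            rcases hh with hh | hh
            · cases hf : k.find? d with
              | none =>
                rw [hf] at hh
                simp only [Option.getD] at hh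
                rw [pvEmptyT_hasNode] at hh
                right; rw [hh]
                exact List.cons_prefix_cons.mpr ⟨rfl, List.nil_prefix⟩
              | some ch' =>
                rw [hf] at hh
                left; rw [pyTrie_hasNode_cons]; exact ⟨ch', hf, hh⟩
            · right; exact List.cons_prefix_cons.mpr ⟨rfl, hh⟩
          · intro hh
            refine ⟨_, pyKids_find?_set_self k d _, ?_⟩
            rw [insertB_hasNode cs' v _ l']
            rcases hh with hh | hh
            · rw [pyTrie_hasNode_cons] at hh
              obtain ⟨ch, hch, hh⟩ := hh
              left; rw [hch]; exact hh
            · right; exact (List.cons_prefix_cons.mp hh).2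
        · rw [pyTrie_hasNode_cons, pyTrie_hasNode_cons]
          have hpre : ¬ ((d :: l') <+: (c :: cs')) := by
            intro h; exact hd (List.cons_prefix_cons.mp h).1
          rw [pyKids_find?_set_ne _ _ _ _ hd]
          simp [hpre]

theorem insertB_wfAt : ∀ (cs : List Char) (v : Int) (t : PyTrie), (∀ m, t.wfAt m) →
    ∀ l, (t.insertB cs v).wfAt l
  | [], v, t, hwf, l => by
      obtain ⟨w, b, k⟩ := t
      intro k' hk'
      rw [insertB_unfold_nil, pyTrie_kidsAt_mk w w _ b] at hk'
      exact hwf l k' hk'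
  | c :: cs', v, t, hwf, l => by
      obtain ⟨w, b, k⟩ := t
      intro k' hk'
      cases l with
      | nil =>
        rw [insertB_unfold_cons, pyTrie_kidsAt_nil] at hk'
        cases hk'
        rw [pyKids_keys_set]
        have hnd : k.keys.Nodup := hwf [] k (pyTrie_kidsAt_nil w b k)
        by_cases hm : c ∈ k.keys
        · simp [hm, hnd]
        · simp only [hm, if_false]
          rw [List.nodup_append]
          refine ⟨hnd, List.nodup_singleton c, ?_⟩
          intro a ha hb hbc
          rw [List.mem_singleton] at hbc
          subst hbc
          intro he
          subst he
          exact hm ha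
      | cons d l' =>
        rw [insertB_unfold_cons, pyTrie_kidsAt_cons] at hk'
        by_cases hd : d = c
        · subst hd
          rw [pyKids_find?_set_self] at hk'
          have hchwf : ∀ m, ((k.find? d).getD (PyTrie.mk none none PyKids.nil)).wfAt m := by
            intro m
            cases hf : k.find? d with
            | none => simp only [hf, Option.getD]; exact pvEmptyT_wfAt m
            | some ch =>
              simp only [hf, Option.getD]
              intro k2 hk2
              apply hwf (d :: m) k2
              rw [pyTrie_kidsAt_cons, hf]
              exact hk2
          exact insertB_wfAt cs' v _ hchwf l' k' hk'
        · rw [pyKids_find?_set_ne _ _ _ _ hd] at hk'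
          apply hwf (d :: l') k'
          rw [pyTrie_kidsAt_cons]
          exact hk'

-- ---- fold characterizations, A side ----
theorem foldW_wordAt (wordCost : List (String × Int)) (l : List Char) :
    ∀ (words : List String) (t : PyTrie),
    ((words.foldl (fun t w => t.insertW w.toList ((PySem.Dict.mk wordCost).getD w 0)) t).wordAt l) =
      if ∃ w ∈ words, w.toList = l then some (wLookup wordCost l) else t.wordAt l
  | [], t => by simp
  | w0 :: ws, t => by
      rw [List.foldl_cons, foldW_wordAt wordCost l ws, insertW_wordAt]
      by_cases h1 : ∃ w ∈ ws, w.toList = l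
      · simp [h1]
      · by_cases h2 : l = w0.toList
        · subst h2
          have hx : ∃ w ∈ w0 :: ws, w.toList = w0.toList := ⟨w0, by simp⟩
          simp [h1, hx, wLookup, String.ofList_toList]
        · have h3 : ¬ (w0.toList = l) := fun e => h2 e.symm
          have hx : ¬ ∃ w ∈ w0 :: ws, w.toList = l := by
            rintro ⟨w, hw, he⟩
            rcases List.mem_cons.mp hw with rfl | hw'
            · exact h2 he.symm
            · exact h1 ⟨w, hw', he⟩
          simp [h1, h2, h3, hx]

theorem foldW_bundleAt (wordCost : List (String × Int)) (l : List Char) :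
    ∀ (words : List String) (t : PyTrie),
    ((words.foldl (fun t w => t.insertW w.toList ((PySem.Dict.mk wordCost).getD w 0)) t).bundleAt l) =
      t.bundleAt l
  | [], t => by simp
  | w0 :: ws, t => by
      rw [List.foldl_cons, foldW_bundleAt wordCost l ws, insertW_bundleAt]

theorem foldW_hasNode (wordCost : List (String × Int)) (l : List Char) :
    ∀ (words : List String) (t : PyTrie),
    ((words.foldl (fun t w => t.insertW w.toList ((PySem.Dict.mk wordCost).getD w 0)) t).hasNode l) ↔
      t.hasNode l ∨ ∃ w ∈ words, l <+: w.toList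
  | [], t => by simp
  | w0 :: ws, t => by
      rw [List.foldl_cons, foldW_hasNode wordCost l ws, insertW_hasNode]
      constructor
      · rintro (⟨h | h⟩ | ⟨w, hw, hp⟩)
        · exact Or.inl h
        · exact Or.inr ⟨w0, by simp, h⟩
        · exact Or.inr ⟨w, by simp [hw], hp⟩
      · rintro (h | ⟨w, hw, hp⟩)
        · exact Or.inl (Or.inl h)
        · rcases List.mem_cons.mp hw with rfl | hw'
          · exact Or.inl (Or.inr hp)
          · exact Or.inr ⟨w, hw', hp⟩

theorem foldW_wfAt (wordCost : List (String × Int)) :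
    ∀ (words : List String) (t : PyTrie), (∀ m, t.wfAt m) →
    ∀ l, ((words.foldl (fun t w => t.insertW w.toList ((PySem.Dict.mk wordCost).getD w 0)) t).wfAt l)
  | [], t, hwf, l => hwf l
  | w0 :: ws, t, hwf, l => by
      rw [List.foldl_cons]
      exact foldW_wfAt wordCost ws _ (insertW_wfAt w0.toList _ t hwf) l

theorem foldB_wordAt (l : List Char) :
    ∀ (items : List (String × Int)) (t : PyTrie),
    ((items.foldl (fun t pc => t.insertB pc.1.toList pc.2) t).wordAt l) = t.wordAt l
  | [], t => by simp
  | pc :: rest, t => by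
      rw [List.foldl_cons, foldB_wordAt l rest, insertB_wordAt]

theorem foldB_bundleAt (l : List Char) :
    ∀ (items : List (String × Int)) (t : PyTrie),
    ((items.foldl (fun t pc => t.insertB pc.1.toList pc.2) t).bundleAt l) = bopt items l (t.bundleAt l)
  | [], t => by simp [bopt]
  | pc :: rest, t => by
      rw [List.foldl_cons, foldB_bundleAt l rest, insertB_bundleAt]
      show _ = bopt rest l _
      by_cases h : pc.1.toList = l
      · subst h
        simp [bopt, List.foldl_cons]
      · have : ¬ (l = pc.1.toList) := fun e => h e.symm
        simp [bopt, List.foldl_cons, h, this]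

theorem foldB_hasNode (l : List Char) :
    ∀ (items : List (String × Int)) (t : PyTrie),
    ((items.foldl (fun t pc => t.insertB pc.1.toList pc.2) t).hasNode l) ↔
      t.hasNode l ∨ ∃ pc ∈ items, l <+: pc.1.toList
  | [], t => by simp
  | pc :: rest, t => by
      rw [List.foldl_cons, foldB_hasNode l rest, insertB_hasNode]
      constructor
      · rintro (⟨h | h⟩ | ⟨q, hq, hp⟩)
        · exact Or.inl h
        · exact Or.inr ⟨pc, by simp, h⟩
        · exact Or.inr ⟨q, by simp [hq], hp⟩
      · rintro (h | ⟨q, hq, hp⟩)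
        · exact Or.inl (Or.inl h)
        · rcases List.mem_cons.mp hq with rfl | hq'
          · exact Or.inl (Or.inr hp)
          · exact Or.inr ⟨q, hq', hp⟩

theorem foldB_wfAt :
    ∀ (items : List (String × Int)) (t : PyTrie), (∀ m, t.wfAt m) →
    ∀ l, ((items.foldl (fun t pc => t.insertB pc.1.toList pc.2) t).wfAt l)
  | [], t, hwf, l => hwf l
  | pc :: rest, t, hwf, l => by
      rw [List.foldl_cons]
      exact foldB_wfAt rest _ (insertB_wfAt pc.1.toList pc.2 t hwf) l

-- ---- B-side dict/set characterizations ----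
theorem altWc_get?_gen (wordCost : List (String × Int)) (l : List Char) :
    ∀ (words : List String) (d : PySem.Dict (List Char) Int),
    ((words.foldl (fun d w => d.insert w.toList ((PySem.Dict.mk wordCost).getD w 0)) d).get? l) =
      if ∃ w ∈ words, w.toList = l then some (wLookup wordCost l) else d.get? l
  | [], d => by simp
  | w0 :: ws, d => by
      rw [List.foldl_cons, altWc_get?_gen wordCost l ws, PySem.Dict.get?_insert]
      by_cases h1 : ∃ w ∈ ws, w.toList = l
      · simp [h1]
      · by_cases h2 : l = w0.toList
        · subst h2
          have hx : ∃ w ∈ w0 :: ws, w.toList = w0.toList := ⟨w0, by simp⟩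
          simp [h1, hx, wLookup, String.ofList_toList]
        · have h3 : ¬ (w0.toList = l) := fun e => h2 e.symm
          have hx : ¬ ∃ w ∈ w0 :: ws, w.toList = l := by
            rintro ⟨w, hw, he⟩
            rcases List.mem_cons.mp hw with rfl | hw'
            · exact h2 he.symm
            · exact h1 ⟨w, hw', he⟩
          simp [h1, h2, h3, hx]

theorem altWc_get? (words : List String) (wordCost : List (String × Int)) (l : List Char) :
    (altWc words wordCost).get? l =
      if ∃ w ∈ words, w.toList = l then some (wLookup wordCost l) else none := by
  unfold altWc
  rw [altWc_get?_gen]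
  simp [PySem.Dict.get?_empty]

theorem altBc_get?_gen (l : List Char) :
    ∀ (items : List (String × Int)) (d : PySem.Dict (List Char) Int),
    ((items.foldl (fun d pc =>
        d.insert pc.1.toList (match d.get? pc.1.toList with | some m => min m pc.2 | none => pc.2)) d).get? l) =
      bopt items l (d.get? l)
  | [], d => by simp [bopt]
  | pc :: rest, d => by
      rw [List.foldl_cons, altBc_get?_gen l rest, PySem.Dict.get?_insert]
      by_cases h : pc.1.toList = l
      · subst h
        simp only [if_pos rfl]
        show _ = bopt rest _ _
        simp only [bopt, List.foldl_cons, if_pos rfl]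
        cases hd : d.get? pc.1.toList <;> simp [hd]
      · have : ¬ (l = pc.1.toList) := fun e => h e.symm
        rw [if_neg this]
        show bopt rest l _ = bopt (pc :: rest) l _
        simp [bopt, List.foldl_cons, h]

theorem altBc_get? (items : List (String × Int)) (l : List Char) :
    (altBc items).get? l = bopt items l none := by
  unfold altBc
  rw [altBc_get?_gen]
  simp [PySem.Dict.get?_empty]

theorem bopt_isSome (l : List Char) :
    ∀ (items : List (String × Int)) (o : Option Int),
    (bopt items l o).isSome ↔ o.isSome ∨ ∃ pc ∈ items, pc.1.toList = l
  | [], o => by simp [bopt]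
  | pc :: rest, o => by
      have step : bopt (pc :: rest) l o =
          bopt rest l (if pc.1.toList = l then some (match o with | none => pc.2 | some m => min m pc.2) else o) := by
        simp [bopt, List.foldl_cons]
      rw [step, bopt_isSome l rest]
      by_cases h : pc.1.toList = l
      · simp [h]
      · simp only [h, if_false, List.mem_cons]
        constructor
        · rintro (ho | ⟨q, hq, he⟩)
          · exact Or.inl ho
          · exact Or.inr ⟨q, Or.inr hq, he⟩
        · rintro (ho | ⟨q, hq | hq, he⟩)
          · exact Or.inl ho
          · exact absurd (hq ▸ he) h
          · exact Or.inr ⟨q, hq, he⟩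

theorem mem_inner_fold (k : List Char) (s : PySem.Set (List Char)) (l : List Char) :
    l ∈ (PySem.List.pyRange 1 ((k.length : Int) + 1) 1).foldl
        (fun s i => PySem.Set.add s (k.take i.toNat)) s ↔
      l ∈ s ∨ (l ≠ [] ∧ l <+: k) := by
  rw [PySem.Set.mem_foldl_add]
  constructor
  · rintro (h | ⟨i, hi, rfl⟩)
    · exact Or.inl h
    · rw [PySem.List.mem_pyRange_one] at hi
      right
      have h1 : (1 : Int) ≤ i := hi.1
      have h2 : i < (k.length : Int) + 1 := hi.2
      have h3 : i.toNat ≤ k.length := by omega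
      have h4 : 0 < i.toNat := by omega
      constructor
      · intro he
        have h5 := congrArg List.length he
        rw [List.length_take] at h5
        simp only [List.length_nil] at h5
        omega
      · exact List.take_prefix _ _
  · rintro (h | ⟨hne, hp⟩)
    · exact Or.inl h
    · right
      refine ⟨(l.length : Int), ?_, ?_⟩
      · rw [PySem.List.mem_pyRange_one]
        have h1 : 1 ≤ l.length := by
          cases l with
          | nil => exact absurd rfl hne
          | cons a as => simp
        have h2 : l.length ≤ k.length := hp.length_le
        omega
      · rw [Int.toNat_natCast]
        exact List.prefix_iff_eq_take.mp hp

theorem mem_altPrefixes (l : List Char) :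
    ∀ (ks : List (List Char)), l ∈ altPrefixes ks ↔ l ≠ [] ∧ ∃ k ∈ ks, l <+: k := by
  have gen : ∀ (ks : List (List Char)) (s : PySem.Set (List Char)),
      l ∈ ks.foldl (fun s k =>
        (PySem.List.pyRange 1 ((k.length : Int) + 1) 1).foldl
          (fun s i => PySem.Set.add s (k.take i.toNat)) s) s ↔
        l ∈ s ∨ (l ≠ [] ∧ ∃ k ∈ ks, l <+: k) := by
    intro ks
    induction ks with
    | nil => simp
    | cons k0 rest ih =>
      intro s
      rw [List.foldl_cons, ih, mem_inner_fold]
      constructor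
      · rintro ((h | ⟨hne, hp⟩) | ⟨hne, q, hq, hp⟩)
        · exact Or.inl h
        · exact Or.inr ⟨hne, k0, by simp, hp⟩
        · exact Or.inr ⟨hne, q, by simp [hq], hp⟩
      · rintro (h | ⟨hne, q, hq, hp⟩)
        · exact Or.inl (Or.inl h)
        · rcases List.mem_cons.mp hq with rfl | hq'
          · exact Or.inl (Or.inr ⟨hne, hp⟩)
          · exact Or.inr ⟨hne, q, hq', hp⟩
  intro ks
  unfold altPrefixes
  rw [gen]
  simp [PySem.Set.empty]

theorem nodup_altPrefixes (ks : List (List Char)) : (altPrefixes ks).Nodup := by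
  have gen : ∀ (ks : List (List Char)) (s : PySem.Set (List Char)), s.Nodup →
      (ks.foldl (fun s k =>
        (PySem.List.pyRange 1 ((k.length : Int) + 1) 1).foldl
          (fun s i => PySem.Set.add s (k.take i.toNat)) s) s).Nodup := by
    intro ks
    induction ks with
    | nil => intro s hs; exact hs
    | cons k0 rest ih =>
      intro s hs
      rw [List.foldl_cons]
      apply ih
      rw [← PySem.Set.update_map_eq_foldl_add]
      exact PySem.Set.nodup_update _ _ hs
  exact gen ks PySem.Set.empty (by simp [PySem.Set.empty])

-- the conditional-accumulate fold of altSolve, as a filtered sum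
theorem foldl_if_add (n : Nat) (p : List Char) (f : List Char → Int) :
    ∀ (l : List (List Char)) (init : Int),
    l.foldl (fun acc q => if q.length = n ∧ q.take p.length = p then acc + f q else acc) init
      = init + ((l.filter (fun q => decide (q.length = n ∧ q.take p.length = p))).map f).sum
  | [], init => by simp
  | q :: rest, init => by
      rw [List.foldl_cons, foldl_if_add n p f rest, List.filter_cons]
      by_cases h : q.length = n ∧ q.take p.length = p
      · simp only [h, and_self, decide_true, if_true, if_pos h, List.map_cons, List.sum_cons]
        ring
      · have hd : decide (q.length = n ∧ q.take p.length = p) = false := by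
          simp only [decide_eq_false_iff_not]; exact h
        rw [if_neg h, hd, if_neg (by simp)]

-- ---- the abstract bridge: dfs of any trie satisfying the six facts = altSolve ----
theorem pvMain (ROOT : PyTrie) (pref : List (List Char)) (wc bc : PySem.Dict (List Char) Int) (L : Nat)
    (H1 : ∀ l, ROOT.wordAt l = wc.get? l)
    (H2 : ∀ l, ROOT.bundleAt l = bc.get? l)
    (H3 : ∀ l, l ≠ [] → (ROOT.hasNode l ↔ l ∈ pref))
    (H4 : ∀ l, ROOT.wfAt l)
    (H5 : pref.Nodup)
    (H6 : ∀ q ∈ pref, q.length ≤ L) :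
    ∀ (fuel : Nat) (l : List Char) (t : PyTrie), ROOT.nodeAt l = some t →
      L + 1 ≤ fuel + l.length → t.dfs = altSolve pref wc bc fuel l := by
  intro fuel
  induction fuel with
  | zero =>
    intro l t hnode hle
    exfalso
    have hh : ROOT.hasNode l := by simp [PyTrie.hasNode, hnode]
    cases l with
    | nil => simp at hle
    | cons a as =>
      have hmem : (a :: as) ∈ pref := (H3 _ (by simp)).mp hh
      have hlen := H6 _ hmem
      simp only [List.length_cons, Nat.zero_add] at hle hlen
      omega
  | succ fuel ih =>
    intro l t hnode hle
    obtain ⟨w, b, k⟩ := t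
    have hw : ROOT.wordAt l = w := by simp [PyTrie.wordAt, hnode]
    have hb : ROOT.bundleAt l = b := by simp [PyTrie.bundleAt, hnode]
    have hk : ROOT.kidsAt l = some k := by simp [PyTrie.kidsAt, hnode]
    have hknd : k.keys.Nodup := H4 l k hk
    -- children characterization
    have hchild : ∀ c, c ∈ k.keys ↔ (l ++ [c]) ∈ pref := by
      intro c
      rw [← pyKids_find?_isSome_iff]
      have : ROOT.hasNode (l ++ [c]) ↔ (k.find? c).isSome := by
        unfold PyTrie.hasNode
        rw [pyTrie_nodeAt_append_singleton, hk]
      rw [← this]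
      exact H3 (l ++ [c]) (by simp)
    -- the permutation between the filtered prefixes and the child labels
    have hperm : (pref.filter (fun q => decide (q.length = l.length + 1 ∧ q.take l.length = l))).Perm
        (k.keys.map (fun c => l ++ [c])) := by
      apply (List.perm_ext_iff_of_nodup (H5.filter _) ?_).mpr
      · intro q
        simp only [List.mem_filter, decide_eq_true_eq, List.mem_map]
        constructor
        · rintro ⟨hq, hlen, htake⟩
          have hpre : l <+: q := by
            rw [List.prefix_iff_eq_take, htake]
          obtain ⟨r, rfl⟩ := hpre
          have hr : r.length = 1 := by
            have := hlen
            simp [List.length_append] at this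
            omega
          obtain ⟨c, rfl⟩ := List.length_eq_one_iff.mp hr
          exact ⟨c, (hchild c).mpr hq, rfl⟩
        · rintro ⟨c, hc, rfl⟩
          refine ⟨(hchild c).mp hc, by simp, ?_⟩
          rw [List.take_left]
      · apply List.Nodup.map ?_ hknd
        intro a b hab
        have : [a] = [b] := by
          have := List.append_cancel_left hab
          exact this
        simpa using this
    -- each child's dfs is the recursive solve
    have hmapeq : (k.keys.map (fun c => ((k.find? c).getD (PyTrie.mk none none PyKids.nil)).dfs)) =
        (k.keys.map (fun c => altSolve pref wc bc fuel (l ++ [c]))) := by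
      apply List.map_congr_left
      intro c hc
      obtain ⟨ch, hch⟩ := Option.isSome_iff_exists.mp ((pyKids_find?_isSome_iff k c).mpr hc)
      have hnode' : ROOT.nodeAt (l ++ [c]) = some ch := by
        rw [pyTrie_nodeAt_append_singleton, hk]
        exact hch
      rw [hch]
      simp only [Option.getD]
      apply ih (l ++ [c]) ch hnode'
      simp [List.length_append]
      omega
    -- the sum identity
    have hsum : PyKids.dfsSum k =
        ((pref.filter (fun q => decide (q.length = l.length + 1 ∧ q.take l.length = l))).map
          (fun q => altSolve pref wc bc fuel q)).sum := by
      rw [pyKids_dfsSum_eq k hknd, hmapeq]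
      have := (hperm.map (fun q => altSolve pref wc bc fuel q)).sum_eq
      rw [this, List.map_map]
      rfl
    -- assemble
    show PyTrie.dfs _ = altSolve pref wc bc (fuel + 1) l
    rw [altSolve]
    rw [foldl_if_add]
    have htd : wc.getD l 0 = w.getD 0 := by
      rw [PySem.Dict.getD_eq_get?_getD, ← H1 l, hw]
    rw [htd, ← hsum, ← H2 l, hb]
    cases b with
    | none => simp [PyTrie.dfs]
    | some m => simp [PyTrie.dfs]

-- keys of the two B-side dicts, as membership facts
theorem mem_keys_altWc (words : List String) (wordCost : List (String × Int)) (x : List Char) :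
    x ∈ (altWc words wordCost).keys ↔ ∃ w ∈ words, w.toList = x := by
  rw [← not_iff_not]
  rw [← PySem.Dict.get?_eq_none_iff_not_mem_keys, altWc_get?]
  by_cases h : ∃ w ∈ words, w.toList = x <;> simp [h]

theorem mem_keys_altBc (items : List (String × Int)) (x : List Char) :
    x ∈ (altBc items).keys ↔ ∃ pc ∈ items, pc.1.toList = x := by
  rw [← not_iff_not]
  rw [← PySem.Dict.get?_eq_none_iff_not_mem_keys, altBc_get?]
  rw [← Option.not_isSome_iff_eq_none, bopt_isSome]
  simp

-- ===== VERDICT (by name: the statement is the Claim_ definition above) =====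
theorem minCostBuyAllWords_spec : Claim_equal_minCostBuyAllWords := by
  intro words wordCost bundleCost _hdom _hpre
  unfold Spec_minCostBuyAllWords
  show minCostBuyAllWords words wordCost bundleCost = minCostBuyAllWords_alt words wordCost bundleCost
  unfold minCostBuyAllWords minCostBuyAllWords_alt
  set wc := altWc words wordCost with hwc
  set bc := altBc bundleCost with hbc
  set pref := altPrefixes (wc.keys ++ bc.keys) with hpref
  set L := pref.foldl (fun m q => max m q.length) 0 with hL
  set ROOT := bundleCost.foldl (fun t pc => t.insertB pc.1.toList pc.2)
    (words.foldl (fun t w => t.insertW w.toList ((PySem.Dict.mk wordCost).getD w 0))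
      (PyTrie.mk none none .nil)) with hROOT
  have H1 : ∀ l, ROOT.wordAt l = wc.get? l := by
    intro l
    rw [hROOT, foldB_wordAt, foldW_wordAt, hwc, altWc_get?]
    by_cases h : ∃ w ∈ words, w.toList = l
    · simp [h]
    · simp only [h, if_false]
      exact pvEmptyT_wordAt l
  have H2 : ∀ l, ROOT.bundleAt l = bc.get? l := by
    intro l
    rw [hROOT, foldB_bundleAt, foldW_bundleAt, hbc, altBc_get?]
    have : (PyTrie.mk none none PyKids.nil).bundleAt l = none := pvEmptyT_bundleAt l
    rw [this]
  have H3 : ∀ l, l ≠ [] → (ROOT.hasNode l ↔ l ∈ pref) := by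
    intro l hne
    rw [hROOT, foldB_hasNode, foldW_hasNode, hpref, mem_altPrefixes]
    have hroot : (PyTrie.mk none none PyKids.nil).hasNode l ↔ l = [] := pvEmptyT_hasNode l
    constructor
    · rintro ((h | ⟨w, hw, hp⟩) | ⟨pc, hpc, hp⟩)
      · exact absurd (hroot.mp h) hne
      · exact ⟨hne, w.toList, by rw [List.mem_append]; exact Or.inl ((mem_keys_altWc words wordCost _).mpr ⟨w, hw, rfl⟩), hp⟩
      · exact ⟨hne, pc.1.toList, by rw [List.mem_append]; exact Or.inr ((mem_keys_altBc bundleCost _).mpr ⟨pc, hpc, rfl⟩), hp⟩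
    · rintro ⟨_, q, hq, hp⟩
      rcases List.mem_append.mp hq with hq | hq
      · obtain ⟨w, hw, rfl⟩ := (mem_keys_altWc words wordCost q).mp hq
        exact Or.inl (Or.inr ⟨w, hw, hp⟩)
      · obtain ⟨pc, hpc, rfl⟩ := (mem_keys_altBc bundleCost q).mp hq
        exact Or.inr ⟨pc, hpc, hp⟩
  have H4 : ∀ l, ROOT.wfAt l := by
    intro l
    rw [hROOT]
    apply foldB_wfAt
    intro m
    apply foldW_wfAt
    · intro m'
      exact pvEmptyT_wfAt m'
  have H5 : pref.Nodup := nodup_altPrefixes _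
  have H6 : ∀ q ∈ pref, q.length ≤ L := by
    intro q hq
    exact (PySem.List.le_foldl_max_nat pref List.length 0).2 q hq
  exact pvMain ROOT pref wc bc L H1 H2 H3 H4 H5 H6 (1 + L) [] ROOT
    (pyTrie_nodeAt_nil ROOT) (by omega)
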